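-- pv_equiv track=rewrite | github.com/Pritam-Stats/DSA_with_Python | Modules/03-Array-Techniques/max-occurred-int-gfg.py | maxOccured
-- ===== SOURCE A (Python) =====
-- def maxOccured(L, R):
--     #code here
--     freq = {}
--
--     for l, r in zip(L,R):
--         freq[l] = freq.get(l, 0) + 1
--         freq[r+1] = freq.get(r+1, 0) -1
--
--
--     maxF = 0
--     ans = 0
--     curr = 0
--     for x in sorted(freq):
--         curr += freq[x]
--
--         if curr > maxF:
--             maxF = curr
--             ans = x
--     return ans
-- ===== SOURCE B (Python) =====
-- def maxOccured(L, R):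
--     n = min(len(L), len(R))
--     starts = sorted(L[:n])
--     ends = sorted(r + 1 for r in R[:n])
--     curr = 0
--     maxF = 0
--     ans = 0
--     i = 0
--     j = 0
--     while i < n or j < n:
--         if j >= n or (i < n and starts[i] <= ends[j]):
--             x = starts[i]
--         else:
--             x = ends[j]
--         while i < n and starts[i] == x:
--             curr += 1
--             i += 1
--         while j < n and ends[j] == x:
--             curr -= 1
--             j += 1
--         if curr > maxF:
--             maxF = curr
--             ans = x
--     return ans
-- ===== Notes on version B (the rewrite author's own statement) =====
-- stated objective: alternative
-- what changed: B drops A's delta dictionary and sorted-key pass: it sorts the interval starts and the ends+1 into two lists and merges them with two pointers, maintaining the running coverage and recording the first strict maximum.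
import Mathlib
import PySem

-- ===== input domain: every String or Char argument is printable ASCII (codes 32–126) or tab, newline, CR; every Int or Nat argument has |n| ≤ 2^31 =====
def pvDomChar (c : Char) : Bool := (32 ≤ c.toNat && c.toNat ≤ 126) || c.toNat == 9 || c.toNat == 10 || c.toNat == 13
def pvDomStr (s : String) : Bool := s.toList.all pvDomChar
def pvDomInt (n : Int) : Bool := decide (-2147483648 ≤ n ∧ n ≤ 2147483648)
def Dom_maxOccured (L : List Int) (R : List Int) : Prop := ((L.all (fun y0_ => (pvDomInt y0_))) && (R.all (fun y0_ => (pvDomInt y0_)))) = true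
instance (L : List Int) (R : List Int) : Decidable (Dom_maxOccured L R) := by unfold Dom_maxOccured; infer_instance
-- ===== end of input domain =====

-- B replaces A's dict-of-deltas + sorted-keys sweep by merging two sorted event lists
-- (interval starts, interval ends+1) with two pointers; no dictionary (objective: alternative).

-- ===== PORT A =====
-- `freq[x]` inside A's second loop is ported as `getD x 0`, exact because x ranges over freq's keys.
def maxOccured (L : List Int) (R : List Int) : Int :=
  let freq : PySem.Dict Int Int :=
    (L.zip R).foldl (fun d p =>
      let d1 := d.insert p.1 (d.getD p.1 0 + 1)
      d1.insert (p.2 + 1) (d1.getD (p.2 + 1) 0 - 1)) PySem.Dict.empty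
  let st := (PySem.List.sorted freq.keys (fun x => x)).foldl
      (fun (st : Int × Int × Int) x =>
        let curr := st.2.2 + freq.getD x 0
        if curr > st.1 then (curr, x, curr) else (st.1, st.2.1, curr))
      (0, 0, 0)
  st.2.1

-- ===== PORT B =====
-- inner `while … == x` loops of Source B: consume the equal-to-x prefix, adding delta to curr per element
def pvDropCount (x delta : Int) : List Int → Int → List Int × Int
  | s :: ss, curr => if s = x then pvDropCount x delta ss (curr + delta) else (s :: ss, curr)
  | [], curr => ([], curr)

theorem pvDropCount_spec (x delta : Int) (l : List Int) (c : Int) :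
    pvDropCount x delta l c =
      (l.dropWhile (fun s => s == x), c + delta * ((l.takeWhile (fun s => s == x)).length : Int)) := by
  induction l generalizing c with
  | nil => simp [pvDropCount]
  | cons a t ih =>
    by_cases h : a = x
    · simp [pvDropCount, h, ih]; ring
    · simp [pvDropCount, h]

theorem pvSweep_dec (ss es : List Int) (h : ¬(ss = [] ∧ es = [])) (x : Int)
    (hx : x = if es = [] ∨ (ss ≠ [] ∧ ss.headD 0 ≤ es.headD 0) then ss.headD 0 else es.headD 0) :
    (ss.dropWhile (fun s => s == x)).length + (es.dropWhile (fun s => s == x)).length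
      < ss.length + es.length := by
  rcases ss with _ | ⟨s, ss₀⟩ <;> rcases es with _ | ⟨e, es₀⟩
  · exact absurd ⟨rfl, rfl⟩ h
  · simp only [List.headD_cons] at hx
    simp only [show x = e by simpa using hx, List.dropWhile_nil,
      List.dropWhile_cons_of_pos (by simp : ((e : Int) == e) = true)]
    have := List.length_dropWhile_le (fun y => y == (e : Int)) es₀
    simp; omega
  · simp only [List.headD_cons] at hx
    simp only [show x = s by simpa using hx, List.dropWhile_nil,
      List.dropWhile_cons_of_pos (by simp : ((s : Int) == s) = true)]
    have := List.length_dropWhile_le (fun y => y == (s : Int)) ss₀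
    simp; omega
  · by_cases hse : s ≤ e
    · have hx' : x = s := by rw [hx]; simp [hse]
      rw [hx'] 
      have h1 := List.length_dropWhile_le (fun y => y == (s : Int)) ss₀
      have h2 := List.length_dropWhile_le (fun y => y == (s : Int)) (e :: es₀)
      simp only [List.dropWhile_cons, beq_self_eq_true, if_true, List.length_cons] at *
      omega
    · have hx' : x = e := by rw [hx]; simp [hse]
      rw [hx'] 
      have h1 := List.length_dropWhile_le (fun y => y == (e : Int)) (s :: ss₀)
      have h2 := List.length_dropWhile_le (fun y => y == (e : Int)) es₀
      simp only [List.dropWhile_cons, beq_self_eq_true, if_true, List.length_cons] at *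
      omega

-- outer `while i < n or j < n` loop of Source B; the index pair (i, j) becomes the pair of
-- remaining suffixes of starts/ends, so `starts[i]` is the head of the first suffix.
def pvSweep (ss es : List Int) (curr maxF ans : Int) : Int :=
  if ss = [] ∧ es = [] then ans
  else
    -- Python picks x = starts[i] when j >= n or (i < n and starts[i] <= ends[j]); on the
    -- remaining suffixes that is: es exhausted, or ss nonempty with head ss ≤ head es.
    let x : Int := if es = [] ∨ (ss ≠ [] ∧ ss.headD 0 ≤ es.headD 0) then ss.headD 0 else es.headD 0
    let p := pvDropCount x 1 ss curr
    let q := pvDropCount x (-1) es p.2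
    if q.2 > maxF then pvSweep p.1 q.1 q.2 q.2 x
    else pvSweep p.1 q.1 q.2 maxF ans
  termination_by ss.length + es.length
  decreasing_by
  all_goals
    rename_i h _
    simp only [pvDropCount_spec]
    exact pvSweep_dec ss es h _ rfl

def maxOccured_alt (L : List Int) (R : List Int) : Int :=
  let n : Int := min (L.length : Int) (R.length : Int)
  let starts := PySem.List.sorted (PySem.List.slice L none (some n)) (fun x => x)
  let ends := PySem.List.sorted ((PySem.List.slice R none (some n)).map (fun r => r + 1)) (fun x => x)
  pvSweep starts ends 0 0 0

-- ===== PRECONDITION & SPEC =====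
def Spec_maxOccured (L : List Int) (R : List Int) (out : Int) : Prop := out = maxOccured_alt L R
instance (L : List Int) (R : List Int) (out : Int) : Decidable (Spec_maxOccured L R out) := by unfold Spec_maxOccured; infer_instance

-- ===== CLAIM (what is proved, stated in full; the proofs are below) =====
def Claim_equal_maxOccured : Prop := ∀ (L : List Int) (R : List Int), Dom_maxOccured L R → Spec_maxOccured L R (maxOccured L R)

-- ===== LEMMAS AND PROOFS =====

-- the common shape: sweep a list of (point, delta) pairs, recording the first strict maximum
def pvSweepP : List (Int × Int) → Int → Int → Int → Int
  | [], _, _, ans => ans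
  | p :: ps, curr, maxF, ans =>
    let c := curr + p.2
    if c > maxF then pvSweepP ps c c p.1 else pvSweepP ps c maxF ans

theorem foldA_eq_sweepP (g : Int → Int) (pts : List Int) (curr maxF ans : Int) :
    (pts.foldl (fun (st : Int × Int × Int) x =>
        let c := st.2.2 + g x
        if c > st.1 then (c, x, c) else (st.1, st.2.1, c)) (maxF, ans, curr)).2.1
      = pvSweepP (pts.map (fun x => (x, g x))) curr maxF ans := by
  induction pts generalizing curr maxF ans with
  | nil => simp [pvSweepP]
  | cons a t ih =>
    simp only [List.foldl_cons, List.map_cons, pvSweepP]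
    by_cases h : curr + g a > maxF
    · simpa [h, add_comm] using ih (curr + g a) (curr + g a) a
    · simpa [h, add_comm] using ih (curr + g a) maxF ans

theorem dropWhile_eq_filter_of_lb {x : Int} {l : List Int}
    (hs : l.Pairwise (· ≤ ·)) (hlb : ∀ y ∈ l, x ≤ y) :
    l.dropWhile (fun s => s == x) = l.filter (fun s => !(s == x)) ∧
      ((l.takeWhile (fun s => s == x)).length : Int) = l.count x := by
  induction l with
  | nil => simp
  | cons a t ih =>
    by_cases h : a = x
    · subst h
      have ht := ih (List.Pairwise.sublist (List.sublist_cons_self a t) hs)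
        (fun y hy => hlb y (List.mem_cons_of_mem _ hy))
      simp [List.dropWhile_cons, List.takeWhile_cons, List.count_cons, ht.1, ht.2]
    · have hx_lt : ∀ y ∈ a :: t, x < y := by
        intro y hy
        rcases List.mem_cons.mp hy with rfl | hy'
        · exact lt_of_le_of_ne (hlb y (List.mem_cons_self)) (fun e => h e.symm)
        · exact lt_of_lt_of_le (lt_of_le_of_ne (hlb a List.mem_cons_self) (fun e => h e.symm))
            (List.rel_of_pairwise_cons hs hy')
      have hne : ∀ y ∈ a :: t, (y == x) = false := by
        intro y hy; simpa using (ne_of_gt (hx_lt y hy))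
      constructor
      · rw [List.dropWhile_cons_of_neg (by simp [h]), List.filter_eq_self.mpr (by intro y hy; simp [hne y hy])]
      · rw [List.takeWhile_cons_of_neg (by simp [h])]
        simp [List.count_eq_zero.mpr (fun hx => by simpa using hne x hx)]

-- the sorted distinct event points split off their minimum
theorem sorted_ofList_cons (ss es : List Int)
    (hs : ss.Pairwise (· ≤ ·)) (he : es.Pairwise (· ≤ ·)) (x : Int)
    (hmem : x ∈ ss ++ es) (hlb : ∀ y ∈ ss ++ es, x ≤ y) :
    PySem.List.sorted (PySem.Set.ofList (ss ++ es)) (fun x => x) =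
      x :: PySem.List.sorted (PySem.Set.ofList
        (ss.dropWhile (fun s => s == x) ++ es.dropWhile (fun s => s == x))) (fun x => x) := by
  have hfs := (dropWhile_eq_filter_of_lb hs (fun y hy => hlb y (List.mem_append_left _ hy))).1
  have hfe := (dropWhile_eq_filter_of_lb he (fun y hy => hlb y (List.mem_append_right _ hy))).1
  set Q := PySem.List.sorted (PySem.Set.ofList
      (ss.dropWhile (fun s => s == x) ++ es.dropWhile (fun s => s == x))) (fun x => x) with hQ
  have hmemQ : ∀ y, y ∈ Q ↔ (y ∈ ss ++ es ∧ y ≠ x) := by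
    intro y
    rw [hQ, PySem.List.mem_sorted, PySem.Set.mem_ofList, hfs, hfe]
    simp [List.mem_filter, List.mem_append]
    tauto
  have hQlt : ∀ y ∈ Q, x < y := by
    intro y hy
    have := (hmemQ y).mp hy
    exact lt_of_le_of_ne (hlb y this.1) (fun e => this.2 e.symm)
  apply PySem.List.sorted_eq_of_perm_of_pairwise_lt
  · rw [List.perm_ext_iff_of_nodup]
    · intro y
      simp only [List.mem_cons, PySem.Set.mem_ofList, hmemQ]
      constructor
      · rintro (rfl | ⟨hy, _⟩) <;> [exact hmem; exact hy]
      · intro hy; by_cases hyx : y = x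
        · exact Or.inl hyx
        · exact Or.inr ⟨hy, hyx⟩
    · refine List.Nodup.cons (fun hx => absurd (hQlt x hx) (lt_irrefl x)) ?_
      exact ((PySem.List.sorted_perm _ _ _).nodup_iff).mpr (PySem.Set.nodup_ofList _)
    · exact PySem.Set.nodup_ofList _
  · exact List.Pairwise.cons hQlt (PySem.List.sorted_ofList_pairwise_lt _)

-- one unfolding of the outer loop, for the minimum event point x
theorem pvSweep_step (ss es : List Int) (curr maxF ans x : Int)
    (hne : ¬(ss = [] ∧ es = []))
    (hs : ss.Pairwise (· ≤ ·)) (he : es.Pairwise (· ≤ ·))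
    (hmem : x ∈ ss ++ es) (hlb : ∀ y ∈ ss ++ es, x ≤ y) :
    pvSweep ss es curr maxF ans =
      if curr + (ss.count x : Int) - (es.count x : Int) > maxF then
        pvSweep (ss.dropWhile (fun s => s == x)) (es.dropWhile (fun s => s == x))
          (curr + (ss.count x : Int) - (es.count x : Int)) (curr + (ss.count x : Int) - (es.count x : Int)) x
      else
        pvSweep (ss.dropWhile (fun s => s == x)) (es.dropWhile (fun s => s == x))
          (curr + (ss.count x : Int) - (es.count x : Int)) maxF ans := by
  have hts := (dropWhile_eq_filter_of_lb hs (fun y hy => hlb y (List.mem_append_left _ hy))).2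
  have hte := (dropWhile_eq_filter_of_lb he (fun y hy => hlb y (List.mem_append_right _ hy))).2
  have hxval : (if es = [] ∨ (ss ≠ [] ∧ ss.headD 0 ≤ es.headD 0) then ss.headD 0 else es.headD 0) = x := by
    rcases ss with _ | ⟨s, ss₀⟩ <;> rcases es with _ | ⟨e, es₀⟩
    · exact absurd ⟨rfl, rfl⟩ hne
    · have h1 : x ≤ e := hlb e (by simp)
      have h2 : e ≤ x := by
        have hx : x ∈ e :: es₀ := by simpa using hmem
        rcases List.mem_cons.mp hx with rfl | hx'
        · exact le_refl _
        · exact List.rel_of_pairwise_cons he hx'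
      exact le_antisymm h2 h1
    · have h1 : x ≤ s := hlb s (by simp)
      have h2 : s ≤ x := by
        have hx : x ∈ s :: ss₀ := by simpa using hmem
        rcases List.mem_cons.mp hx with rfl | hx'
        · exact le_refl _
        · exact List.rel_of_pairwise_cons hs hx'
      exact le_antisymm h2 h1
    · have h1 : x ≤ s := hlb s (by simp)
      have h2 : x ≤ e := hlb e (by simp)
      have h3 : s ≤ x ∨ e ≤ x := by
        rcases List.mem_append.mp hmem with hx | hx
        · left
          rcases List.mem_cons.mp hx with rfl | hx'
          · exact le_refl _
          · exact List.rel_of_pairwise_cons hs hx'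
        · right
          rcases List.mem_cons.mp hx with rfl | hx'
          · exact le_refl _
          · exact List.rel_of_pairwise_cons he hx'
      have : (if s ≤ e then s else e) = x := by split_ifs <;> omega
      simpa using this
  rw [pvSweep.eq_def]
  rw [if_neg hne]
  simp only [hxval, pvDropCount_spec, hts, hte]
  have harith : curr + 1 * (ss.count x : Int) + -1 * (es.count x : Int)
      = curr + (ss.count x : Int) - (es.count x : Int) := by ring
  rw [harith]

theorem pvSweep_eq_sweepP : ∀ (N : Nat) (ss es : List Int), ss.length + es.length ≤ N →
    ss.Pairwise (· ≤ ·) → es.Pairwise (· ≤ ·) → ∀ (curr maxF ans : Int),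
    pvSweep ss es curr maxF ans =
      pvSweepP ((PySem.List.sorted (PySem.Set.ofList (ss ++ es)) (fun x => x)).map
          (fun y => (y, (ss.count y : Int) - (es.count y : Int)))) curr maxF ans := by
  intro N
  induction N with
  | zero =>
    intro ss es hlen _ _ curr maxF ans
    have hss : ss = [] := List.eq_nil_of_length_eq_zero (by omega)
    have hes : es = [] := List.eq_nil_of_length_eq_zero (by omega)
    subst hss; subst hes
    rw [pvSweep.eq_def]
    simp [pvSweepP, PySem.List.sorted, PySem.Set.ofList]
  | succ N ih =>
    intro ss es hlen hs he curr maxF ans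
    by_cases hemp : ss = [] ∧ es = []
    · obtain ⟨rfl, rfl⟩ := hemp
      rw [pvSweep.eq_def]
      simp [pvSweepP, PySem.List.sorted, PySem.Set.ofList]
    · obtain ⟨x, hmem, hlb⟩ : ∃ x, x ∈ ss ++ es ∧ ∀ y ∈ ss ++ es, x ≤ y := by
        rcases ss with _ | ⟨s, ss₀⟩ <;> rcases es with _ | ⟨e, es₀⟩
        · exact absurd ⟨rfl, rfl⟩ hemp
        · refine ⟨e, by simp, ?_⟩
          intro y hy; simp only [List.nil_append] at hy
          rcases List.mem_cons.mp hy with rfl | hy'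
          · exact le_refl _
          · exact List.rel_of_pairwise_cons he hy'
        · refine ⟨s, by simp, ?_⟩
          intro y hy; simp only [List.append_nil] at hy
          rcases List.mem_cons.mp hy with rfl | hy'
          · exact le_refl _
          · exact List.rel_of_pairwise_cons hs hy'
        · refine ⟨min s e, by rcases min_choice s e with h | h <;> rw [h] <;> simp, ?_⟩
          intro y hy
          rcases List.mem_append.mp hy with hy' | hy'
          · refine le_trans (min_le_left _ _) ?_
            rcases List.mem_cons.mp hy' with rfl | hy'' ; · exact le_refl _
            exact List.rel_of_pairwise_cons hs hy''
          · refine le_trans (min_le_right _ _) ?_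
            rcases List.mem_cons.mp hy' with rfl | hy'' ; · exact le_refl _
            exact List.rel_of_pairwise_cons he hy''
      have hfs := (dropWhile_eq_filter_of_lb hs (fun y hy => hlb y (List.mem_append_left _ hy))).1
      have hfe := (dropWhile_eq_filter_of_lb he (fun y hy => hlb y (List.mem_append_right _ hy))).1
      have hlen' : (ss.filter (fun s => !(s == x))).length + (es.filter (fun s => !(s == x))).length ≤ N := by
        have h1 : (ss.filter (fun s => !(s == x))).length ≤ ss.length := List.length_filter_le _ _
        have h2 : (es.filter (fun s => !(s == x))).length ≤ es.length := List.length_filter_le _ _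
        rcases List.mem_append.mp hmem with hx | hx
        · have h3 : (ss.filter (fun s => !(s == x))).length < ss.length :=
            List.length_filter_lt_length_iff_exists.mpr ⟨x, hx, by simp⟩
          omega
        · have h3 : (es.filter (fun s => !(s == x))).length < es.length :=
            List.length_filter_lt_length_iff_exists.mpr ⟨x, hx, by simp⟩
          omega
      have hs' : (ss.filter (fun s => !(s == x))).Pairwise (· ≤ ·) := List.Pairwise.filter _ hs
      have he' : (es.filter (fun s => !(s == x))).Pairwise (· ≤ ·) := List.Pairwise.filter _ he
      -- the two delta maps agree on the remaining points
      have hmap : (PySem.List.sorted (PySem.Set.ofList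
              (ss.filter (fun s => !(s == x)) ++ es.filter (fun s => !(s == x)))) (fun x => x)).map
            (fun y => (y, ((ss.filter (fun s => !(s == x))).count y : Int)
                - ((es.filter (fun s => !(s == x))).count y : Int)))
          = (PySem.List.sorted (PySem.Set.ofList
              (ss.filter (fun s => !(s == x)) ++ es.filter (fun s => !(s == x)))) (fun x => x)).map
            (fun y => (y, (ss.count y : Int) - (es.count y : Int))) := by
        apply List.map_congr_left
        intro y hy
        have hymem : y ∈ ss.filter (fun s => !(s == x)) ++ es.filter (fun s => !(s == x)) := by
          have := (PySem.List.sorted_perm _ (fun x : Int => x) false).mem_iff.mp hy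
          exact (PySem.Set.mem_ofList _ _).mp this
        have hyne : (y == x) = false := by
          rcases List.mem_append.mp hymem with hy' | hy'
          · simpa using (List.mem_filter.mp hy').2
          · simpa using (List.mem_filter.mp hy').2
        have hc1 : (ss.filter (fun s => !(s == x))).count y = ss.count y :=
          List.count_filter (by simpa using hyne)
        have hc2 : (es.filter (fun s => !(s == x))).count y = es.count y :=
          List.count_filter (by simpa using hyne)
        rw [hc1, hc2]
      rw [pvSweep_step ss es curr maxF ans x hemp hs he hmem hlb]
      rw [sorted_ofList_cons ss es hs he x hmem hlb]
      rw [hfs, hfe]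
      simp only [List.map_cons, pvSweepP]
      by_cases hgt : curr + (ss.count x : Int) - (es.count x : Int) > maxF
      · rw [if_pos hgt, if_pos (by omega : curr + ((ss.count x : Int) - (es.count x : Int)) > maxF)]
        rw [ih _ _ hlen' hs' he' _ _ _, hmap,
          (by ring : curr + ((ss.count x : Int) - (es.count x : Int)) = curr + (ss.count x : Int) - (es.count x : Int))]
      · rw [if_neg hgt, if_neg (by omega : ¬ (curr + ((ss.count x : Int) - (es.count x : Int)) > maxF))]
        rw [ih _ _ hlen' hs' he' _ _ _, hmap,
          (by ring : curr + ((ss.count x : Int) - (es.count x : Int)) = curr + (ss.count x : Int) - (es.count x : Int))]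

theorem fold_pair_eq_flatMap (l : List (Int × Int)) (d : PySem.Dict Int Int) :
    l.foldl (fun d p =>
        let d1 := d.insert p.1 (d.getD p.1 0 + 1)
        d1.insert (p.2 + 1) (d1.getD (p.2 + 1) 0 - 1)) d
      = (l.flatMap (fun p => [(p.1, (1 : Int)), (p.2 + 1, -1)])).foldl
          (fun d (q : Int × Int) => d.insert q.1 (d.getD q.1 0 + q.2)) d := by
  induction l generalizing d with
  | nil => simp
  | cons p t ih =>
    simp only [List.foldl_cons, List.flatMap_cons, List.foldl_append, List.foldl_cons, List.foldl_nil]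
    rw [ih]
    congr 1

theorem keys_pair_fold (l : List (Int × Int)) :
    (l.foldl (fun d p =>
        let d1 := d.insert p.1 (d.getD p.1 0 + 1)
        d1.insert (p.2 + 1) (d1.getD (p.2 + 1) 0 - 1)) (PySem.Dict.empty : PySem.Dict Int Int)).keys
      = PySem.Set.ofList (l.flatMap (fun p => [p.1, p.2 + 1])) := by
  rw [fold_pair_eq_flatMap]
  rw [PySem.Dict.keys_foldl_insert_key _ Prod.fst (fun d q => d.getD q.1 0 + q.2)]
  rw [PySem.Dict.keys_empty]
  rw [List.map_flatMap]
  rw [PySem.Set.ofList_eq_foldl]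
  simp [PySem.Set.update]

theorem getD_pair_fold (l : List (Int × Int)) (d : PySem.Dict Int Int) (x : Int) :
    (l.foldl (fun d p =>
        let d1 := d.insert p.1 (d.getD p.1 0 + 1)
        d1.insert (p.2 + 1) (d1.getD (p.2 + 1) 0 - 1)) d).getD x 0
      = d.getD x 0 + ((l.map Prod.fst).count x : Int) - ((l.map (fun p => p.2 + 1)).count x : Int) := by
  induction l generalizing d with
  | nil => simp
  | cons p t ih =>
    simp only [List.foldl_cons, List.map_cons, List.count_cons, ih]
    have hd1 : ∀ y v : Int, ((d.insert p.1 v).getD y 0) = (if p.1 = y then v else d.getD y 0) := by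
      intro y v; by_cases h1 : p.1 = y
      · subst h1; simp [PySem.Dict.getD_insert_self]
      · simp [h1, PySem.Dict.getD_insert_of_ne _ _ _ (fun e => h1 e.symm)]
    have hd2 : ∀ (dd : PySem.Dict Int Int) (v : Int), ((dd.insert (p.2+1) v).getD x 0) = (if p.2+1 = x then v else dd.getD x 0) := by
      intro dd v; by_cases h2 : p.2 + 1 = x
      · subst h2; simp [PySem.Dict.getD_insert_self]
      · simp [h2, PySem.Dict.getD_insert_of_ne _ _ _ (fun e => h2 e.symm)]
    simp only [hd2, hd1]
    by_cases h1 : p.1 = x <;> by_cases h2 : p.2 + 1 = x <;>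
      simp [h1, h2] <;> (try split_ifs) <;> push_cast <;> omega

theorem zip_map_fst (L R : List Int) :
    (L.zip R).map Prod.fst = L.take (min L.length R.length) := by
  induction L generalizing R with
  | nil => simp
  | cons a t ih =>
    rcases R with _ | ⟨b, u⟩
    · simp
    · simp [ih u, Nat.succ_min_succ, List.take_succ_cons]

theorem zip_map_snd (L R : List Int) :
    (L.zip R).map Prod.snd = R.take (min L.length R.length) := by
  induction L generalizing R with
  | nil => simp
  | cons a t ih =>
    rcases R with _ | ⟨b, u⟩
    · simp
    · simp [ih u, Nat.succ_min_succ, List.take_succ_cons]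

-- ===== VERDICT (by name: the statement is the Claim_ definition above) =====
theorem maxOccured_spec : Claim_equal_maxOccured := by
  intro L R _
  unfold Spec_maxOccured
  simp only [maxOccured, maxOccured_alt]
  -- the slice bounds: L[:n] with n = min(len L, len R)
  have hmin : min (L.length : Int) (R.length : Int) = ((min L.length R.length : Nat) : Int) := by
    push_cast; omega
  have hsl : PySem.List.slice L none (some (min (L.length : Int) (R.length : Int)))
      = L.take (min L.length R.length) := by
    rw [PySem.List.slice_to _ (by positivity)]
    congr 1
    omega
  have hsr : PySem.List.slice R none (some (min (L.length : Int) (R.length : Int)))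
      = R.take (min L.length R.length) := by
    rw [PySem.List.slice_to _ (by positivity)]
    congr 1
    omega
  rw [hsl, hsr]
  rw [foldA_eq_sweepP]
  rw [keys_pair_fold]
  -- names
  set n := min L.length R.length with hn
  set S := PySem.List.sorted (L.take n) (fun x => x) with hS
  set E := PySem.List.sorted ((R.take n).map (fun r => r + 1)) (fun x => x) with hE
  have hfst := zip_map_fst L R
  rw [← hn] at hfst
  have hsnd : (L.zip R).map (fun p => p.2 + 1) = (R.take n).map (fun r => r + 1) := by
    have : (L.zip R).map (fun p => p.2 + 1) = ((L.zip R).map Prod.snd).map (fun r => r + 1) := by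
      rw [List.map_map]; rfl
    rw [this, zip_map_snd]
  -- the event-point lists agree as sorted sets
  have hpts : PySem.List.sorted (PySem.Set.ofList ((L.zip R).flatMap (fun p => [p.1, p.2 + 1]))) (fun x => x)
      = PySem.List.sorted (PySem.Set.ofList (S ++ E)) (fun x => x) := by
    apply PySem.List.sorted_eq_sorted_of_perm _ _ _ (fun a b h => h)
    rw [List.perm_ext_iff_of_nodup (PySem.Set.nodup_ofList _) (PySem.Set.nodup_ofList _)]
    intro y
    simp only [PySem.Set.mem_ofList, List.mem_flatMap, List.mem_append, hS, hE,
      PySem.List.mem_sorted, List.mem_cons, List.not_mem_nil, or_false]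
    constructor
    · rintro ⟨p, hp, rfl | rfl⟩
      · exact Or.inl (by rw [← hfst]; exact List.mem_map_of_mem hp)
      · refine Or.inr ?_
        rw [← hsnd]; exact List.mem_map_of_mem hp
    · rintro (hy | hy)
      · rw [← hfst] at hy
        obtain ⟨p, hp, rfl⟩ := List.mem_map.mp hy
        exact ⟨p, hp, Or.inl rfl⟩
      · rw [← hsnd] at hy
        obtain ⟨p, hp, rfl⟩ := List.mem_map.mp hy
        exact ⟨p, hp, Or.inr rfl⟩
  rw [hpts]
  -- the per-point deltas agree
  have hfun : (fun x => (x, ((L.zip R).foldl (fun d p =>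
        let d1 := d.insert p.1 (d.getD p.1 0 + 1)
        d1.insert (p.2 + 1) (d1.getD (p.2 + 1) 0 - 1)) PySem.Dict.empty).getD x 0))
      = (fun y => (y, ((S.count y : Int) - (E.count y : Int)))) := by
    funext y
    have h := getD_pair_fold (L.zip R) PySem.Dict.empty y
    simp only [hfst, hsnd] at h
    have hcS : S.count y = (L.take n).count y := (PySem.List.sorted_perm _ _ _).count_eq y
    have hcE : E.count y = ((R.take n).map (fun r => r + 1)).count y :=
      (PySem.List.sorted_perm _ _ _).count_eq y
    simp only [h, hcS, hcE, ← hn]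
    simp
  rw [hfun]
  rw [pvSweep_eq_sweepP (S.length + E.length) S E le_rfl
    (PySem.List.sorted_pairwise (L.take n) (fun x : Int => x))
    (PySem.List.sorted_pairwise ((R.take n).map (fun r => r + 1)) (fun x : Int => x))]
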